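-- pv_equiv track=rewrite | github.com/alanlindsay100/mast_xaip_toolkit | xaip_tools/user_io/best_match.py | levenshtein_distance_with_indices
-- ===== SOURCE A (Python) =====
-- def levenshtein_distance_with_indices(str1, str2):
--     len_str1 = len(str1)
--     len_str2 = len(str2)
--
--     # Create a matrix to store intermediate results
--     matrix = [[0] * (len_str2 + 1) for _ in range(len_str1 + 1)]
--
--     # Initialize the matrix
--     for i in range(len_str1 + 1):
--         matrix[i][0] = i
--     for j in range(len_str2 + 1):
--         matrix[0][j] = j
--
--     # Initialize a list to store matching indices
--     matching_indices = []
--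
--     # Fill in the matrix with minimum distances
--     for i in range(1, len_str1 + 1):
--         for j in range(1, len_str2 + 1):
--             cost = 0 if str1[i - 1] == str2[j - 1] else 1
--             matrix[i][j] = min(
--                 matrix[i - 1][j] + 1,      # Deletion
--                 matrix[i][j - 1] + 1,      # Insertion
--                 matrix[i - 1][j - 1] + cost  # Substitution
--             )
--
--     # Backtrack to find matching indices
--     i, j = len_str1, len_str2
--     while i > 0 and j > 0:
--         if str1[i - 1] == str2[j - 1]:
--             matching_indices.append((i - 1, j - 1))
--             i -= 1
--             j -= 1
--         elif matrix[i][j] == matrix[i - 1][j] + 1: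
--             i -= 1  # Deletion
--         elif matrix[i][j] == matrix[i][j - 1] + 1:
--             j -= 1  # Insertion
--         else:
--             i -= 1
--             j -= 1  # Substitution
--
--     # Reverse the list to get the matching indices in the correct order
--     matching_indices.reverse()
--
--     # Return Levenshtein distance and matching indices
--     return matrix[len_str1][len_str2], matching_indices
-- ===== SOURCE B (Python) =====
-- # Fused single pass: each DP cell carries a shared parent-pointer chain of the
-- # matching index pairs on its path, so there is no stored matrix and no
-- # backtrack phase; the final cell's chain is unwound and reversed at the end.
-- def levenshtein_distance_with_indices(str1, str2):
--     n = len(str2)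
--     # prev[j] = (distance, chain) for the current row; chain is a linked
--     # cons cell ((i, j), parent) holding matched index pairs, newest first.
--     prev = [(j, None) for j in range(n + 1)]
--     i = 0
--     for c in str1:
--         cur = [(i + 1, None)]
--         for j in range(1, n + 1):
--             up_d, up_p = prev[j]
--             left_d, left_p = cur[j - 1]
--             diag_d, diag_p = prev[j - 1]
--             if c == str2[j - 1]:
--                 cell = (min(up_d + 1, left_d + 1, diag_d), ((i, j - 1), diag_p))
--             else:
--                 d = min(up_d + 1, left_d + 1, diag_d + 1)
--                 if d == up_d + 1:
--                     cell = (d, up_p)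
--                 elif d == left_d + 1:
--                     cell = (d, left_p)
--                 else:
--                     cell = (d, diag_p)
--             cur.append(cell)
--         prev = cur
--         i += 1
--     dist, node = prev[n]
--     indices = []
--     while node is not None:
--         indices.append(node[0])
--         node = node[1]
--     indices.reverse()
--     return dist, indices
-- ===== Notes on version B (the rewrite author's own statement) =====
-- stated objective: alternative
-- what changed: B fuses filling and backtracking into one forward pass: each DP cell of a rolling row carries a shared parent-pointer chain of its matching index pairs, so B stores no matrix and has no backtrack loop; the final cell's chain is unwound and reversed.
import Mathlib
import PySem

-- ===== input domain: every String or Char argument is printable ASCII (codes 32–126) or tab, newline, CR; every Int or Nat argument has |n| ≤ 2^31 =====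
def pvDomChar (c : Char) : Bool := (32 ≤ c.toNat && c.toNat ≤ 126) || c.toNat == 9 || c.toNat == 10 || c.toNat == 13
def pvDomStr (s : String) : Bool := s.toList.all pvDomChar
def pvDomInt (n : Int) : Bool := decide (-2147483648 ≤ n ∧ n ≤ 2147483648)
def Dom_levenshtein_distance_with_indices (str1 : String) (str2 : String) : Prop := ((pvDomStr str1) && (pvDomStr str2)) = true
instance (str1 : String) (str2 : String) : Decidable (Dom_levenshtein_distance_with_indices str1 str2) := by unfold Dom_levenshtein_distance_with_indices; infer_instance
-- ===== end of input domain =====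

-- B fuses fill and backtrack into one forward pass: each DP cell of a rolling row carries a
-- shared chain of its matching index pairs, so B stores no matrix and has no backtrack loop.

-- ===== PORT A =====
-- A fills the matrix row by row (matrix[i][j] uses only row i-1 and the entries of row i to
-- its left, and rows below i are never read before being set), so the matrix is transcribed
-- as a list of rows each computed from the previous one; all indices are in range, so
-- List.getD with a default transcribes Python's in-range indexing exactly.
def pvFillRow (c : Char) : List Char → List Int → Int → List Int
  | ch :: s2, pd :: p :: rest, left =>
      let v := min (min (p + 1) (left + 1)) (pd + (if c == ch then (0 : Int) else 1))
      v :: pvFillRow c s2 (p :: rest) v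
  | _, _, _ => []

def pvBuildRows (s2 : List Char) : List Char → Int → List Int → List (List Int)
  | [], _, prev => [prev]
  | c :: s1, i, prev => prev :: pvBuildRows s2 s1 (i + 1) ((i + 1) :: pvFillRow c s2 prev (i + 1))

def pvMget (M : List (List Int)) (i j : Nat) : Int := (M.getD i []).getD j 0

def pvBackA (s1 s2 : List Char) (M : List (List Int)) : Nat → Nat → List (Int × Int) → List (Int × Int)
  | i + 1, j + 1, acc =>
      if s1.getD i ' ' == s2.getD j ' ' then
        pvBackA s1 s2 M i j (acc ++ [((i : Int), (j : Int))])
      else if pvMget M (i + 1) (j + 1) == pvMget M i (j + 1) + 1 then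
        pvBackA s1 s2 M i (j + 1) acc
      else if pvMget M (i + 1) (j + 1) == pvMget M (i + 1) j + 1 then
        pvBackA s1 s2 M (i + 1) j acc
      else
        pvBackA s1 s2 M i j acc
  | _, _, acc => acc
  termination_by i j _ => i + j

def levenshtein_distance_with_indices (str1 : String) (str2 : String) : Int × (List (Int × Int)) :=
  let s1 := str1.toList
  let s2 := str2.toList
  let M := pvBuildRows s2 s1 0 ((List.range (s2.length + 1)).map (fun j => Int.ofNat j))
  (pvMget M s1.length s2.length, (pvBackA s1 s2 M s1.length s2.length []).reverse)

-- ===== PORT B =====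
-- Each cell is (distance, chain); the chain (Python's linked cons cells, newest pair first)
-- is a Lean list sharing its tail with the parent cell's chain.
def pvRowB : Char → Nat → List Char → Nat → List (Int × List (Int × Int)) → (Int × List (Int × Int)) → List (Int × List (Int × Int))
  | c, i, ch :: s2, j, pd :: p :: rest, left =>
      let cell :=
        if c == ch then
          ((min (min (p.1 + 1) (left.1 + 1)) pd.1, ((i : Int), (j : Int)) :: pd.2) : Int × List (Int × Int))
        else
          let d := min (min (p.1 + 1) (left.1 + 1)) (pd.1 + 1)
          (d, if d == p.1 + 1 then p.2 else if d == left.1 + 1 then left.2 else pd.2)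
      cell :: pvRowB c i s2 (j + 1) (p :: rest) cell
  | _, _, _, _, _, _ => []

def pvLoopB (s2 : List Char) : List Char → Nat → List (Int × List (Int × Int)) → List (Int × List (Int × Int))
  | [], _, prev => prev
  | c :: s1, i, prev =>
      pvLoopB s2 s1 (i + 1) ((((i : Int) + 1, []) : Int × List (Int × Int)) :: pvRowB c i s2 0 prev ((i : Int) + 1, []))

def levenshtein_distance_with_indices_alt (str1 : String) (str2 : String) : Int × (List (Int × Int)) :=
  let s1 := str1.toList
  let s2 := str2.toList
  let final := pvLoopB s2 s1 0 ((List.range (s2.length + 1)).map (fun j => (Int.ofNat j, ([] : List (Int × Int)))))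
  let cell := final.getD s2.length (0, [])
  (cell.1, cell.2.reverse)

-- ===== PRECONDITION & SPEC =====
def Spec_levenshtein_distance_with_indices (str1 : String) (str2 : String) (out : Int × (List (Int × Int))) : Prop := out = levenshtein_distance_with_indices_alt str1 str2
instance (str1 : String) (str2 : String) (out : Int × (List (Int × Int))) : Decidable (Spec_levenshtein_distance_with_indices str1 str2 out) := by unfold Spec_levenshtein_distance_with_indices; infer_instance

-- ===== CLAIM (what is proved, stated in full; the proofs are below) =====
def Claim_equal_levenshtein_distance_with_indices : Prop := ∀ (str1 : String) (str2 : String), Dom_levenshtein_distance_with_indices str1 str2 → Spec_levenshtein_distance_with_indices str1 str2 (levenshtein_distance_with_indices str1 str2)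

-- ===== LEMMAS AND PROOFS =====

-- A's matrix, and the specification of a B cell: its distance is the matrix entry, its chain
-- is exactly what A's backtrack started at that cell produces (newest pair first).
def pvM (s1 s2 : List Char) : List (List Int) :=
  pvBuildRows s2 s1 0 ((List.range (s2.length + 1)).map (fun j => Int.ofNat j))

def specCell (s1 s2 : List Char) (i j : Nat) : Int × List (Int × Int) :=
  (pvMget (pvM s1 s2) i j, pvBackA s1 s2 (pvM s1 s2) i j [])

def specFrom (s1 s2 : List Char) (i j : Nat) : List (Int × List (Int × Int)) :=
  (List.range' j (s2.length + 1 - j)).map (specCell s1 s2 i)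

theorem pvFillRow_length (c : Char) : ∀ (s2 : List Char) (prev : List Int) (left : Int),
    prev.length = s2.length + 1 → (pvFillRow c s2 prev left).length = s2.length := by
  intro s2
  induction s2 with
  | nil => intro prev left _; simp [pvFillRow]
  | cons ch s2 ih =>
    intro prev left h
    match prev with
    | [] => simp at h
    | [pd] => simp at h
    | pd :: p :: rest =>
      simp only [List.length_cons] at h ⊢
      rw [pvFillRow]
      simp only [List.length_cons]
      rw [ih (p :: rest) _ (by simp only [List.length_cons]; omega)]

theorem pvRows_getD_zero (s2 : List Char) (s1 : List Char) (i : Int) (prev : List Int) :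
    (pvBuildRows s2 s1 i prev).getD 0 [] = prev := by
  cases s1 <;> simp [pvBuildRows]

theorem pvRows_rowlen (s2 : List Char) : ∀ (s1 : List Char) (k : Nat) (i : Int) (prev : List Int),
    prev.length = s2.length + 1 → k ≤ s1.length →
    ((pvBuildRows s2 s1 i prev).getD k []).length = s2.length + 1 := by
  intro s1
  induction s1 with
  | nil =>
    intro k i prev h hk
    match k, hk with
    | 0, _ => simp [pvBuildRows, h]
  | cons c s1 ih =>
    intro k i prev h hk
    match k with
    | 0 => rw [pvRows_getD_zero]; exact h
    | k + 1 =>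
      rw [pvBuildRows]
      simp only [List.getD_cons_succ]
      exact ih k (i + 1) _ (by simp [pvFillRow_length c s2 prev (i + 1) h]) (by simpa using hk)

theorem pvRows_step (s2 : List Char) : ∀ (k : Nat) (s1 : List Char) (i : Int) (prev : List Int),
    k < s1.length →
    (pvBuildRows s2 s1 i prev).getD (k + 1) [] =
      (i + k + 1) :: pvFillRow (s1.getD k ' ') s2 ((pvBuildRows s2 s1 i prev).getD k []) (i + k + 1) := by
  intro k
  induction k with
  | zero =>
    intro s1 i prev hk
    match s1 with
    | c :: s1 =>
      rw [pvBuildRows]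
      simp only [List.getD_cons_succ, List.getD_cons_zero, pvRows_getD_zero]
      norm_num
  | succ k ih =>
    intro s1 i prev hk
    match s1 with
    | c :: s1 =>
      rw [pvBuildRows]
      simp only [List.getD_cons_succ]
      rw [ih s1 (i + 1) _ (by simpa using hk)]
      have : i + 1 + (k : Int) + 1 = i + ((k : Int) + 1) + 1 := by ring
      rw [this]
      push_cast
      rfl

theorem pvFillRow_getD (c : Char) : ∀ (s2 : List Char) (prev : List Int) (left : Int) (j : Nat),
    prev.length = s2.length + 1 → j < s2.length →
    (pvFillRow c s2 prev left).getD j 0 =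
      min (min (prev.getD (j + 1) 0 + 1) ((left :: pvFillRow c s2 prev left).getD j 0 + 1))
        (prev.getD j 0 + (if c == s2.getD j ' ' then 0 else 1)) := by
  intro s2
  induction s2 with
  | nil => intro prev left j _ hj; simp at hj
  | cons ch s2 ih =>
    intro prev left j h hj
    match prev with
    | [] => simp at h
    | [pd] => simp at h
    | pd :: p :: rest =>
      match j with
      | 0 =>
        rw [pvFillRow]
        simp
      | j + 1 =>
        rw [pvFillRow]
        simp only [List.getD_cons_succ]
        exact ih (p :: rest) _ j (by simp only [List.length_cons] at h ⊢; omega)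
          (by simpa using hj)

theorem pvMget_step (s1 s2 : List Char) (i j : Nat) (hi : i < s1.length) (hj : j < s2.length) :
    pvMget (pvM s1 s2) (i + 1) (j + 1) =
      min (min (pvMget (pvM s1 s2) i (j + 1) + 1) (pvMget (pvM s1 s2) (i + 1) j + 1))
        (pvMget (pvM s1 s2) i j + (if s1.getD i ' ' == s2.getD j ' ' then 0 else 1)) := by
  have hrow0 : ((List.range (s2.length + 1)).map (fun j => Int.ofNat j)).length = s2.length + 1 := by simp
  have hstep := pvRows_step s2 i s1 0 ((List.range (s2.length + 1)).map (fun j => Int.ofNat j)) hi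
  have harith : (0 : Int) + i + 1 = (i : Int) + 1 := by ring
  rw [harith] at hstep
  have hlen := pvRows_rowlen s2 s1 i 0 ((List.range (s2.length + 1)).map (fun j => Int.ofNat j)) hrow0 (le_of_lt hi)
  rw [← pvM] at hstep hlen
  have hfill := pvFillRow_getD (s1.getD i ' ') s2 ((pvM s1 s2).getD i []) ((i : Int) + 1) j hlen hj
  show ((pvM s1 s2).getD (i + 1) []).getD (j + 1) 0 = _
  rw [hstep]
  simp only [List.getD_cons_succ]
  rw [hfill]
  have hleft : (((i : Int) + 1) :: pvFillRow (s1.getD i ' ') s2 ((pvM s1 s2).getD i []) ((i : Int) + 1)).getD j 0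
      = pvMget (pvM s1 s2) (i + 1) j := by
    rw [pvMget, hstep]
  rw [hleft]
  rfl

theorem pvBackA_acc (s1 s2 : List Char) (M : List (List Int)) : ∀ (f i j : Nat) (acc : List (Int × Int)),
    i + j ≤ f → pvBackA s1 s2 M i j acc = acc ++ pvBackA s1 s2 M i j [] := by
  intro f
  induction f with
  | zero =>
    intro i j acc hf
    have hi : i = 0 := by omega
    have hj : j = 0 := by omega
    subst hi; subst hj
    simp [pvBackA]
  | succ f ih =>
    intro i j acc hf
    match i, j with
    | 0, j => simp [pvBackA]
    | i + 1, 0 => simp [pvBackA]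
    | i + 1, j + 1 =>
      rw [pvBackA, pvBackA]
      split_ifs with h1 h2 h3
      · rw [ih i j (acc ++ [((i : Int), (j : Int))]) (by omega),
          ih i j ([] ++ [((i : Int), (j : Int))]) (by omega)]
        simp
      · exact ih i (j + 1) acc (by omega)
      · exact ih (i + 1) j acc (by omega)
      · exact ih i j acc (by omega)

theorem pvBackA_step (s1 s2 : List Char) (M : List (List Int)) (i j : Nat) :
    pvBackA s1 s2 M (i + 1) (j + 1) [] =
      if s1.getD i ' ' == s2.getD j ' ' then ((i : Int), (j : Int)) :: pvBackA s1 s2 M i j []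
      else if pvMget M (i + 1) (j + 1) == pvMget M i (j + 1) + 1 then pvBackA s1 s2 M i (j + 1) []
      else if pvMget M (i + 1) (j + 1) == pvMget M (i + 1) j + 1 then pvBackA s1 s2 M (i + 1) j []
      else pvBackA s1 s2 M i j [] := by
  rw [pvBackA]
  split_ifs with h1 h2 h3
  · rw [pvBackA_acc s1 s2 M (i + j) i j ([] ++ [((i : Int), (j : Int))]) le_rfl]
    simp
  · rfl
  · rfl
  · rfl

theorem pvCell_step (s1 s2 : List Char) (i j : Nat) (hi : i < s1.length) (hj : j < s2.length) :
    (if s1.getD i ' ' == s2.getD j ' ' then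
       ((min (min ((specCell s1 s2 i (j + 1)).1 + 1) ((specCell s1 s2 (i + 1) j).1 + 1)) (specCell s1 s2 i j).1,
         ((i : Int), (j : Int)) :: (specCell s1 s2 i j).2) : Int × List (Int × Int))
     else
       let d := min (min ((specCell s1 s2 i (j + 1)).1 + 1) ((specCell s1 s2 (i + 1) j).1 + 1)) ((specCell s1 s2 i j).1 + 1)
       (d, if d == (specCell s1 s2 i (j + 1)).1 + 1 then (specCell s1 s2 i (j + 1)).2
           else if d == (specCell s1 s2 (i + 1) j).1 + 1 then (specCell s1 s2 (i + 1) j).2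
           else (specCell s1 s2 i j).2))
    = specCell s1 s2 (i + 1) (j + 1) := by
  have hm := pvMget_step s1 s2 i j hi hj
  have hb := pvBackA_step s1 s2 (pvM s1 s2) i j
  by_cases hc : (s1.getD i ' ' == s2.getD j ' ') = true
  · simp only [hc, if_pos] at hb ⊢
    unfold specCell
    rw [hm]
    simp only [hc, if_true, add_zero]
    rw [hb]
  · simp only [hc, Bool.false_eq_true, if_false] at hm hb ⊢
    unfold specCell
    simp only
    rw [hm, hb, ← hm]

theorem specFrom_cons (s1 s2 : List Char) (i j : Nat) (hj : j ≤ s2.length) :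
    specFrom s1 s2 i j = specCell s1 s2 i j :: specFrom s1 s2 i (j + 1) := by
  unfold specFrom
  have h : s2.length + 1 - j = (s2.length - j) + 1 := by omega
  rw [h, List.range'_succ]
  have h2 : s2.length - j = s2.length + 1 - (j + 1) := by omega
  rw [h2]
  simp

theorem pvRowB_eq (s1 s2 : List Char) (i : Nat) (hi : i < s1.length) : ∀ (k j : Nat), j + k = s2.length →
    pvRowB (s1.getD i ' ') i (s2.drop j) j (specFrom s1 s2 i j) (specCell s1 s2 (i + 1) j) =
      specFrom s1 s2 (i + 1) (j + 1) := by
  intro k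
  induction k with
  | zero =>
    intro j hk
    have hj : j = s2.length := by omega
    subst hj
    rw [List.drop_length, pvRowB.eq_def]
    unfold specFrom
    simp
  | succ k ih =>
    intro j hk
    have hj : j < s2.length := by omega
    rw [List.drop_eq_getElem_cons hj,
      specFrom_cons s1 s2 i j (by omega), specFrom_cons s1 s2 i (j + 1) (by omega)]
    rw [pvRowB]
    have hch : s2[j] = s2.getD j ' ' := (List.getD_eq_getElem s2 ' ' hj).symm
    rw [hch]
    rw [pvCell_step s1 s2 i j hi hj]
    rw [specFrom_cons s1 s2 (i + 1) (j + 1) (by omega)]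
    congr 1
    rw [← specFrom_cons s1 s2 i (j + 1) (by omega)]
    exact ih (j + 1) (by omega)

theorem pvCell_left_boundary (s1 s2 : List Char) (i : Nat) (hi : i < s1.length) :
    specCell s1 s2 (i + 1) 0 = ((i : Int) + 1, []) := by
  unfold specCell
  have hback : pvBackA s1 s2 (pvM s1 s2) (i + 1) 0 [] = [] := by simp [pvBackA]
  have hstep := pvRows_step s2 i s1 0 ((List.range (s2.length + 1)).map (fun j => Int.ofNat j)) hi
  have harith : (0 : Int) + i + 1 = (i : Int) + 1 := by ring
  rw [harith] at hstep
  rw [← pvM] at hstep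
  rw [hback]
  unfold pvMget
  rw [hstep]
  simp

theorem pvLoopB_eq (s1 s2 : List Char) : ∀ (t : List Char) (i : Nat), s1.drop i = t → i ≤ s1.length →
    pvLoopB s2 t i (specFrom s1 s2 i 0) = specFrom s1 s2 s1.length 0 := by
  intro t
  induction t with
  | nil =>
    intro i hdrop hi
    have : i = s1.length := by
      have := List.drop_eq_nil_iff.mp hdrop
      omega
    subst this
    rw [pvLoopB]
  | cons c t ih =>
    intro i hdrop hi
    have hilt : i < s1.length := by
      by_contra h
      rw [List.drop_eq_nil_of_le (by omega)] at hdrop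
      simp at hdrop
    rw [List.drop_eq_getElem_cons hilt] at hdrop
    injection hdrop with hc ht
    rw [pvLoopB]
    have hch : c = s1.getD i ' ' := by
      rw [List.getD_eq_getElem s1 ' ' hilt]; exact hc.symm
    have hrow := pvRowB_eq s1 s2 i hilt (s2.length - 0) 0 (by omega)
    rw [List.drop_zero] at hrow
    rw [hch]
    rw [← pvCell_left_boundary s1 s2 i hilt]
    rw [hrow, ← specFrom_cons s1 s2 (i + 1) 0 (by omega)]
    exact ih (i + 1) ht (by omega)

theorem pvBackA_zero_left (s1 s2 : List Char) (M : List (List Int)) (j : Nat) :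
    pvBackA s1 s2 M 0 j [] = [] := by
  cases j <;> simp [pvBackA]

theorem specCell_zero (s1 s2 : List Char) (j : Nat) (hj : j ≤ s2.length) :
    specCell s1 s2 0 j = ((j : Int), []) := by
  unfold specCell
  rw [pvBackA_zero_left]
  unfold pvMget pvM
  rw [pvRows_getD_zero]
  have hlt : j < ((List.range (s2.length + 1)).map (fun j => Int.ofNat j)).length := by
    simp; omega
  rw [List.getD_eq_getElem _ _ hlt, List.getElem_map]
  simp

theorem specFrom_zero (s1 s2 : List Char) :
    specFrom s1 s2 0 0 = (List.range (s2.length + 1)).map (fun j => (Int.ofNat j, ([] : List (Int × Int)))) := by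
  unfold specFrom
  simp only [Nat.sub_zero, ← List.range_eq_range']
  apply List.map_congr_left
  intro j hj
  rw [List.mem_range] at hj
  exact specCell_zero s1 s2 j (by omega)

-- ===== VERDICT (by name: the statement is the Claim_ definition above) =====
theorem levenshtein_distance_with_indices_spec : Claim_equal_levenshtein_distance_with_indices := by
  intro str1 str2 _
  unfold Spec_levenshtein_distance_with_indices
  unfold levenshtein_distance_with_indices levenshtein_distance_with_indices_alt
  simp only []
  rw [← specFrom_zero str1.toList str2.toList]
  rw [pvLoopB_eq str1.toList str2.toList str1.toList 0 rfl (by omega)]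
  have hcell : (specFrom str1.toList str2.toList str1.toList.length 0).getD str2.toList.length (0, []) =
      specCell str1.toList str2.toList str1.toList.length str2.toList.length := by
    unfold specFrom
    rw [← List.range_eq_range', List.getD_eq_getElem _ _ (by simp)]
    simp
  rw [hcell]
  rfl
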